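-- pv_equiv track=rewrite | github.com/Crediteur/advent-of-code | 2024/day10/trails.py | walk_trails
-- ===== SOURCE A (Python) =====
-- def within_bounds(pos, dimensions) -> bool:
--     pos_y, pos_x = pos
--     height, length = dimensions
--     contained = False
--
--     if pos_y >= 0 and pos_y < height and pos_x >= 0 and pos_x < length:
--         contained = True
--
--     return contained
--
-- def walk_trails(data) -> dict[int, int]:
--     H, L = len(data), len(data[0])
--     starting_spots = []
--
--     # find 0s
--     for y, row in enumerate(data):
--         for x, num in enumerate(row):
--             if num == "0":
--                 starting_spots.append((y, x))
--
--     #                up     right   down    left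
--     directions = [(-1, 0), (0, 1), (1, 0), (0, -1)]
--     spots = [[] for _ in range(len(starting_spots))]
--
--     # iterate through all starting spots and check cardinal directions
--     # for viable incremental trail heights
--
--     for i, pos in enumerate(starting_spots):
--         spots[i].append(pos)
--         trail_h = 1
--
--         # 9 heights
--         while trail_h < 10:
--             new_spots = []
--             # iterate through each updated list heights
--             for y, x in spots[i]:
--                 # check each direction
--                 for d_y, d_x in directions:
--                     y2 = y + d_y
--                     x2 = x + d_x
--                     # check pos is within bounds and next sequential num is correct
--                     if within_bounds((y2, x2), (H, L)) and data[y2][x2] == str(trail_h):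
--                         new_spots.append((y2, x2))
--
--                 # mutate list to pos of new trail heights each itr
--                 spots[i] = new_spots
--             trail_h += 1
--
--     # sum total of each unique ending pos for each trail head
--     score = 0
--     rating = 0
--     for endings in spots:
--         score += len(set(endings))
--         rating += len(endings)
--
--     return {"score": score, "rating": rating}
-- ===== SOURCE B (Python) =====
-- def walk_trails(data) -> dict[int, int]:
--     # Backward DP shared across trailheads: for h = 9..0 compute, for every grid
--     # cell of height h, the set of reachable summits and the number of paths.
--     H, L = len(data), len(data[0])
--     prev = {}  # cells of height h+1 -> (frozenset of summits, path count)
--     for h in range(9, -1, -1):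
--         ch = str(h)
--         cur = {}
--         for y in range(H):
--             row = data[y]
--             for x in range(L):
--                 if row[x] == ch:
--                     if h == 9:
--                         cur[(y, x)] = (frozenset([(y, x)]), 1)
--                     else:
--                         summits = frozenset()
--                         count = 0
--                         for dy, dx in ((-1, 0), (0, 1), (1, 0), (0, -1)):
--                             key = (y + dy, x + dx)
--                             if key in prev:
--                                 s, c = prev[key]
--                                 summits |= s
--                                 count += c
--                         cur[(y, x)] = (summits, count)
--         prev = cur
--     score = 0
--     rating = 0
--     for cell, (summits, count) in prev.items():
--         score += len(summits)
--         rating += count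
--     return {"score": score, "rating": rating}
-- ===== Notes on version B (the rewrite author's own statement) =====
-- stated objective: alternative
-- what changed: A walks each trailhead separately upward in layered lists that grow with the number of paths (worst-case exponential); B computes one backward height-by-height DP table over the grid, storing per cell the set of reachable summits and the path count, shared across all trailheads.
-- outside the precondition, e.g. on walk_trails(['ab', 'c']): A returns {'score': 0, 'rating': 0}, B raises IndexError
import Mathlib
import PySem

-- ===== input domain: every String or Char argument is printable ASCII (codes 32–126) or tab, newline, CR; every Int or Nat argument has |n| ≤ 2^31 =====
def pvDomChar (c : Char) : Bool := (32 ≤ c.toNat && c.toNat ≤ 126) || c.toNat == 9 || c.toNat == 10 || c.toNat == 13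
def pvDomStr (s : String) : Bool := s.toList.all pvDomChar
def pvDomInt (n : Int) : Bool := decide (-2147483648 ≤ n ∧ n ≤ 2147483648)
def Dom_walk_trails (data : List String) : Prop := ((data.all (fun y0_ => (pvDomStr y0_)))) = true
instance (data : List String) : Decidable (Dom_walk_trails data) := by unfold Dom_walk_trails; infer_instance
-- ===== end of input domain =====

-- B replaces A's per-trailhead layered walk (path lists with multiplicity) by one backward
-- height-by-height DP table shared across all trailheads (objective: alternative/worst-case cost).

-- ===== PORT A =====
def within_bounds (pos : Int × Int) (dimensions : Int × Int) : Bool :=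
  let contained := false
  if pos.1 ≥ 0 && pos.1 < dimensions.1 && pos.2 ≥ 0 && pos.2 < dimensions.2 then true
  else contained

-- data[y][x] == s (a 1-char read compared to a string); the none-guards totalize IndexError, excluded by Pre_
def pvCharEq (data : List String) (y x : Int) (s : String) : Bool :=
  match PySem.List.pyGet? data y with
  | some row =>
    match PySem.Str.pyGet? row x with
    | some c => [c] == s.toList
    | none => false
  | none => false

-- one iteration of A's while-body: build new_spots from the current layer
def pvStepA (data : List String) (H L : Int) (th : Int) (s : List (Int × Int)) : List (Int × Int) :=
  s.foldl (fun ns yx =>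
    [((-1 : Int), (0 : Int)), (0, 1), (1, 0), (0, -1)].foldl (fun ns2 d =>
      if within_bounds (yx.1 + d.1, yx.2 + d.2) (H, L) &&
          pvCharEq data (yx.1 + d.1) (yx.2 + d.2) (PySem.Int.toStr th) then
        ns2 ++ [(yx.1 + d.1, yx.2 + d.2)]
      else ns2) ns) []

-- A's 'while trail_h < 10' loop (fuel 9 suffices: trail_h starts at 1)
def pvWhileA (data : List String) (H L : Int) : Nat → Int → List (Int × Int) → List (Int × Int)
  | 0, _, s => s
  | fuel + 1, th, s =>
    if th < 10 then pvWhileA data H L fuel (th + 1) (pvStepA data H L th s) else s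

def walk_trails (data : List String) : List (String × Int) :=
  let H : Int := PySem.List.len data
  let L : Int := PySem.Str.len (PySem.List.pyGetD data 0 "")   -- data[0]; data ≠ [] by Pre_
  let starting_spots : List (Int × Int) :=
    (PySem.List.enumerate data 0).foldl (fun acc p =>
      (PySem.List.enumerate p.2.toList 0).foldl (fun acc2 q =>
        if q.2 == '0' then acc2 ++ [(p.1, q.1)] else acc2) acc) []
  -- each iteration of A's trailhead loop reads and writes only spots[i]: ported per trailhead
  let spots : List (List (Int × Int)) :=
    starting_spots.map (fun pos => pvWhileA data H L 9 1 ([] ++ [pos]))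
  let sr : Int × Int := spots.foldl (fun sr endings =>
      (sr.1 + PySem.List.len (PySem.Set.ofList endings), sr.2 + PySem.List.len endings)) (0, 0)
  [("score", sr.1), ("rating", sr.2)]

-- ===== PORT B =====
-- row[x] == ch (1-char read vs string); the none-guard totalizes IndexError, excluded by Pre_
def pvRowCharEq (row : String) (x : Int) (ch : String) : Bool :=
  match PySem.Str.pyGet? row x with
  | some c => [c] == ch.toList
  | none => false

-- B's inner loop over the four directions: combine the DP values of present neighbours
def pvNbrFold (prev : PySem.Dict (Int × Int) (PySem.Set (Int × Int) × Int)) (y x : Int) :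
    PySem.Set (Int × Int) × Int :=
  [((-1 : Int), (0 : Int)), (0, 1), (1, 0), (0, -1)].foldl (fun sc d =>
    match prev.get? (y + d.1, x + d.2) with
    | some v => (PySem.Set.union sc.1 v.1, sc.2 + v.2)
    | none => sc) (PySem.Set.empty, 0)

-- B's body for one height h: scan the grid, record (summits, count) for every cell of height h
def pvProcess (data : List String) (H L : Int)
    (prev : PySem.Dict (Int × Int) (PySem.Set (Int × Int) × Int)) (h : Int) :
    PySem.Dict (Int × Int) (PySem.Set (Int × Int) × Int) :=
  (PySem.List.pyRange 0 H 1).foldl (fun cur y =>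
    (PySem.List.pyRange 0 L 1).foldl (fun cur x =>
      if pvRowCharEq (PySem.List.pyGetD data y "") x (PySem.Int.toStr h) then
        if h == 9 then cur.insert (y, x) (PySem.Set.ofList [(y, x)], 1)
        else cur.insert (y, x) (pvNbrFold prev y x)
      else cur) cur) PySem.Dict.empty

def walk_trails_alt (data : List String) : List (String × Int) :=
  let H : Int := PySem.List.len data
  let L : Int := PySem.Str.len (PySem.List.pyGetD data 0 "")
  let prev := (PySem.List.pyRange 9 (-1) (-1)).foldl (pvProcess data H L) PySem.Dict.empty
  let sr : Int × Int := prev.items.foldl (fun sr it =>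
      (sr.1 + PySem.List.len it.2.1, sr.2 + it.2.2)) (0, 0)
  [("score", sr.1), ("rating", sr.2)]

-- ===== PRECONDITION & SPEC =====
-- Pre_ excludes empty input (A raises IndexError on data[0]), grids with a row shorter than the
-- first row (A's walk can step into the missing cells and raise IndexError, and B reads them
-- unconditionally), and grids with a '0' at a column ≥ len(data[0]) (a trailhead A scans only by
-- accident of its width bound L = len(data[0])).
def Pre_walk_trails (data : List String) : Prop :=
  data ≠ [] ∧ ∀ row ∈ data,
    (data.headD "").toList.length ≤ row.toList.length ∧
    '0' ∉ row.toList.drop (data.headD "").toList.length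
instance (data : List String) : Decidable (Pre_walk_trails data) := by
  unfold Pre_walk_trails; infer_instance

def pvWitness_walk_trails : List String := ["01", "21"]

def Spec_walk_trails (data : List String) (out : List (String × Int)) : Prop := out = walk_trails_alt data
instance (data : List String) (out : List (String × Int)) : Decidable (Spec_walk_trails data out) := by unfold Spec_walk_trails; infer_instance

-- ===== CLAIM (what is proved, stated in full; the proofs are below) =====
def Claim_equal_walk_trails : Prop := ∀ (data : List String), Dom_walk_trails data → Pre_walk_trails data → Spec_walk_trails data (walk_trails data)


-- ===== LEMMAS AND PROOFS =====

-- ---- proof-side vocabulary ----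
def pvDirsL : List (Int × Int) := [(-1, 0), (0, 1), (1, 0), (0, -1)]

def pvAt (data : List String) (p : Int × Int) : Option Char :=
  match PySem.List.pyGet? data p.1 with
  | some row => PySem.Str.pyGet? row p.2
  | none => none

def pvCondB (data : List String) (H L : Int) (ch : Char) (p : Int × Int) : Bool :=
  (decide (0 ≤ p.1) && decide (p.1 < H) && decide (0 ≤ p.2) && decide (p.2 < L)) &&
    (pvAt data p == some ch)

def pvDigit (n : Nat) : Char := Char.ofNat (48 + n)

def pvNbrs (data : List String) (H L : Int) (ch : Char) (c : Int × Int) : List (Int × Int) :=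
  (pvDirsL.filter (fun d => pvCondB data H L ch (c.1 + d.1, c.2 + d.2))).map
    (fun d => (c.1 + d.1, c.2 + d.2))

def pvEnds (data : List String) (H L : Int) : Nat → (Int × Int) → List (Int × Int)
  | 0, c => [c]
  | k + 1, c => (pvNbrs data H L (pvDigit (9 - k)) c).flatMap (pvEnds data H L k)

def pvReach (data : List String) (H L : Int) : Nat → (Int × Int) → PySem.Set (Int × Int)
  | 0, c => [c]
  | k + 1, c => (pvNbrs data H L (pvDigit (9 - k)) c).foldl
      (fun s n => PySem.Set.union s (pvReach data H L k n)) PySem.Set.empty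

def pvCells (data : List String) (H L : Int) (ch : Char) : List (Int × Int) :=
  ((PySem.List.pyRange 0 H 1) ×ˢ (PySem.List.pyRange 0 L 1)).filter (pvCondB data H L ch)

def pvStepN (data : List String) (H L : Int) (ch : Char) (S : List (Int × Int)) : List (Int × Int) :=
  S.flatMap (pvNbrs data H L ch)

def pvChain (data : List String) (H L : Int) : Nat → List (Int × Int) → List (Int × Int)
  | 0, S => S
  | k + 1, S => pvChain data H L k (pvStepN data H L (pvDigit (9 - k)) S)

def pvTable (data : List String) (H L : Int) (k : Nat) :
    PySem.Dict (Int × Int) (PySem.Set (Int × Int) × Int) :=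
  PySem.Dict.mk ((pvCells data H L (pvDigit (9 - k))).map
    (fun c => (c, (pvReach data H L k c, ((pvEnds data H L k c).length : Int)))))

-- ---- guard characterisations ----
lemma pvOptEq (o : Option Char) (s : String) (ch : Char) (hs : s.toList = [ch]) :
    (match o with | some c => (([c] == s.toList : Bool)) | none => false) = (o == some ch) := by
  cases o with
  | none => rfl
  | some c => rw [hs]; simp

lemma pvCharEq_eq (data : List String) (y x : Int) (s : String) (ch : Char)
    (hs : s.toList = [ch]) : pvCharEq data y x s = (pvAt data (y, x) == some ch) := by
  have hA : pvAt data (y, x)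
      = (match PySem.List.pyGet? data y with
         | some row => PySem.Str.pyGet? row x
         | none => none) := rfl
  unfold pvCharEq
  rw [hA]
  cases PySem.List.pyGet? data y with
  | none => rfl
  | some row => exact pvOptEq _ s ch hs

lemma pvGuard_eq (data : List String) (H L : Int) (s : String) (ch : Char)
    (hs : s.toList = [ch]) (y x : Int) :
    (within_bounds (y, x) (H, L) && pvCharEq data y x s) = pvCondB data H L ch (y, x) := by
  rw [pvCharEq_eq data y x s ch hs]
  simp [within_bounds, pvCondB, ge_iff_le, Bool.and_assoc]

lemma pvRowCharEq_eq (data : List String) (y x : Int) (s : String) (ch : Char)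
    (hs : s.toList = [ch]) (hy0 : 0 ≤ y) (hyH : y < (data.length : Int)) :
    pvRowCharEq (PySem.List.pyGetD data y "") x s = (pvAt data (y, x) == some ch) := by
  obtain ⟨n, rfl⟩ : ∃ n : Nat, y = (n : Int) := ⟨y.toNat, (Int.toNat_of_nonneg hy0).symm⟩
  have hn : n < data.length := by exact_mod_cast hyH
  have hA : pvAt data ((n : Int), x)
      = (match PySem.List.pyGet? data (n : Int) with
         | some row => PySem.Str.pyGet? row x
         | none => none) := rfl
  unfold pvRowCharEq
  rw [hA, PySem.List.pyGetD_natCast, PySem.List.pyGet?_natCast,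
     List.getD_eq_getElem data "" hn, List.getElem?_eq_getElem hn]
  exact pvOptEq _ s ch hs

-- ---- A side: layers are flatMaps of neighbour lists ----
lemma pvStepA_eq (data : List String) (H L : Int) (th : Int) (ch : Char)
    (hch : (PySem.Int.toStr th).toList = [ch]) (S : List (Int × Int)) :
    pvStepA data H L th S = pvStepN data H L ch S := by
  unfold pvStepA pvStepN
  rw [PySem.List.foldl_congr_mem _ _ (fun ns yx => ns ++ pvNbrs data H L ch yx) _ ?_]
  · rw [PySem.List.foldl_append_eq_flatMap]
    simp
  · intro acc yx _
    simp only [pvGuard_eq data H L _ ch hch]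
    rw [PySem.List.foldl_append_if
      (fun d : Int × Int => pvCondB data H L ch (yx.1 + d.1, yx.2 + d.2))
      (fun d : Int × Int => (yx.1 + d.1, yx.2 + d.2))
      [(-1, 0), (0, 1), (1, 0), (0, -1)] acc]
    rfl
lemma pvWhileA_eq (data : List String) (H L : Int) (S : List (Int × Int)) :
    pvWhileA data H L 9 1 S = pvChain data H L 9 S := by
  have unroll : pvWhileA data H L 9 1 S
      = pvStepA data H L 9 (pvStepA data H L 8 (pvStepA data H L 7 (pvStepA data H L 6
          (pvStepA data H L 5 (pvStepA data H L 4 (pvStepA data H L 3 (pvStepA data H L 2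
            (pvStepA data H L 1 S)))))))) := rfl
  have unroll2 : pvChain data H L 9 S
      = pvStepN data H L (pvDigit 9) (pvStepN data H L (pvDigit 8) (pvStepN data H L (pvDigit 7)
          (pvStepN data H L (pvDigit 6) (pvStepN data H L (pvDigit 5) (pvStepN data H L (pvDigit 4)
            (pvStepN data H L (pvDigit 3) (pvStepN data H L (pvDigit 2)
              (pvStepN data H L (pvDigit 1) S)))))))) := rfl
  rw [unroll, unroll2,
    pvStepA_eq data H L 1 (pvDigit 1) (by decide), pvStepA_eq data H L 2 (pvDigit 2) (by decide),
    pvStepA_eq data H L 3 (pvDigit 3) (by decide), pvStepA_eq data H L 4 (pvDigit 4) (by decide),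
    pvStepA_eq data H L 5 (pvDigit 5) (by decide), pvStepA_eq data H L 6 (pvDigit 6) (by decide),
    pvStepA_eq data H L 7 (pvDigit 7) (by decide), pvStepA_eq data H L 8 (pvDigit 8) (by decide),
    pvStepA_eq data H L 9 (pvDigit 9) (by decide)]

lemma pvChain_flat (data : List String) (H L : Int) :
    ∀ (k : Nat) (S : List (Int × Int)),
      pvChain data H L k S = S.flatMap (pvEnds data H L k) := by
  intro k
  induction k with
  | zero => intro S; simp [pvChain, pvEnds]
  | succ k ih =>
    intro S
    show pvChain data H L k (pvStepN data H L (pvDigit (9 - k)) S) = _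
    rw [ih, pvStepN, List.flatMap_assoc]
    rfl

-- ---- reach sets: membership, nodup, cardinality ----
lemma pvMem_foldl_union (g : (Int × Int) → PySem.Set (Int × Int)) :
    ∀ (l : List (Int × Int)) (s0 : PySem.Set (Int × Int)) (x : Int × Int),
      (x ∈ l.foldl (fun s n => PySem.Set.union s (g n)) s0) ↔ x ∈ s0 ∨ ∃ n ∈ l, x ∈ g n := by
  intro l
  induction l with
  | nil => intro s0 x; simp
  | cons a l ih =>
    intro s0 x
    rw [List.foldl_cons, ih]
    simp only [PySem.Set.mem_union, List.mem_cons]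
    constructor
    · rintro ((h | h) | ⟨n, hn, hx⟩)
      · exact Or.inl h
      · exact Or.inr ⟨a, Or.inl rfl, h⟩
      · exact Or.inr ⟨n, Or.inr hn, hx⟩
    · rintro (h | ⟨n, (rfl | hn), hx⟩)
      · exact Or.inl (Or.inl h)
      · exact Or.inl (Or.inr hx)
      · exact Or.inr ⟨n, hn, hx⟩

lemma pvNodup_foldl_union (g : (Int × Int) → PySem.Set (Int × Int)) :
    ∀ (l : List (Int × Int)) (s0 : PySem.Set (Int × Int)), s0.Nodup →
      (l.foldl (fun s n => PySem.Set.union s (g n)) s0).Nodup := by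
  intro l
  induction l with
  | nil => intro s0 h; exact h
  | cons a l ih =>
    intro s0 h
    exact ih _ (PySem.Set.nodup_union _ _ h)

lemma pvReach_nodup (data : List String) (H L : Int) (k : Nat) (c : Int × Int) :
    (pvReach data H L k c).Nodup := by
  cases k with
  | zero => simp [pvReach]
  | succ k =>
    show (List.foldl _ PySem.Set.empty _).Nodup
    exact pvNodup_foldl_union _ _ _ List.nodup_nil

lemma pvReach_mem (data : List String) (H L : Int) :
    ∀ (k : Nat) (c x : Int × Int), x ∈ pvReach data H L k c ↔ x ∈ pvEnds data H L k c := by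
  intro k
  induction k with
  | zero => intro c x; simp [pvReach, pvEnds]
  | succ k ih =>
    intro c x
    show x ∈ List.foldl _ PySem.Set.empty _ ↔ _
    rw [pvMem_foldl_union]
    simp only [pvEnds, List.mem_flatMap]
    constructor
    · rintro (h | ⟨n, hn, hx⟩)
      · cases h
      · exact ⟨n, hn, (ih n x).mp hx⟩
    · rintro ⟨n, hn, hx⟩
      exact Or.inr ⟨n, hn, (ih n x).mpr hx⟩

lemma pvReach_len (data : List String) (H L : Int) (k : Nat) (c : Int × Int) :
    (pvReach data H L k c).length = (PySem.Set.ofList (pvEnds data H L k c)).length := by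
  refine List.Perm.length_eq ?_
  rw [List.perm_ext_iff_of_nodup (pvReach_nodup data H L k c) (PySem.Set.nodup_ofList _)]
  intro a
  rw [pvReach_mem, PySem.Set.mem_ofList]

-- ---- cells ----
lemma pvMem_cells (data : List String) (H L : Int) (ch : Char) (p : Int × Int) :
    p ∈ pvCells data H L ch ↔ pvCondB data H L ch p = true := by
  obtain ⟨y, x⟩ := p
  simp only [pvCells, List.mem_filter]
  constructor
  · rintro ⟨-, h⟩; exact h
  · intro h
    refine ⟨?_, h⟩
    simp only [pvCondB, Bool.and_eq_true, decide_eq_true_eq] at h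
    exact List.mem_product.mpr
      ⟨PySem.List.mem_pyRange_one.mpr ⟨h.1.1.1.1, h.1.1.1.2⟩,
       PySem.List.mem_pyRange_one.mpr ⟨h.1.1.2, h.1.2⟩⟩
lemma pvNodup_cells (data : List String) (H L : Int) (ch : Char) :
    (pvCells data H L ch).Nodup := by
  exact ((PySem.List.nodup_pyRange_one 0 H).product
    (PySem.List.nodup_pyRange_one 0 L)).filter _

-- ---- the DP table ----
lemma pvTable_keys (data : List String) (H L : Int) (k : Nat) :
    (pvTable data H L k).keys = pvCells data H L (pvDigit (9 - k)) := by
  show ((pvCells data H L (pvDigit (9 - k))).map _).map Prod.fst = _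
  rw [List.map_map]
  simp [Function.comp_def]

lemma pvTable_get?_some (data : List String) (H L : Int) (k : Nat) (p : Int × Int)
    (hp : pvCondB data H L (pvDigit (9 - k)) p = true) :
    (pvTable data H L k).get? p
      = some (pvReach data H L k p, ((pvEnds data H L k p).length : Int)) := by
  have hnd : (pvTable data H L k).keys.Nodup := by
    rw [pvTable_keys]; exact pvNodup_cells data H L _
  refine PySem.Dict.get?_of_mem_items _ ?_ hnd
  show _ ∈ (pvCells data H L (pvDigit (9 - k))).map _
  exact List.mem_map.mpr ⟨p, (pvMem_cells data H L _ p).mpr hp, rfl⟩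
lemma pvTable_get?_none (data : List String) (H L : Int) (k : Nat) (p : Int × Int)
    (hp : pvCondB data H L (pvDigit (9 - k)) p = false) :
    (pvTable data H L k).get? p = none := by
  rw [PySem.Dict.get?_eq_none_iff_not_mem_keys, pvTable_keys]
  intro hmem
  rw [pvMem_cells data H L _ p, hp] at hmem
  cases hmem
lemma pvNbrFold_table (data : List String) (H L : Int) (k : Nat) (y x : Int) :
    pvNbrFold (pvTable data H L k) y x
      = ((pvNbrs data H L (pvDigit (9 - k)) (y, x)).foldl
            (fun s n => PySem.Set.union s (pvReach data H L k n)) PySem.Set.empty,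
         ((pvNbrs data H L (pvDigit (9 - k)) (y, x)).map
            (fun n => ((pvEnds data H L k n).length : Int))).sum) := by
  have hgen : ∀ (ds : List (Int × Int)) (init : PySem.Set (Int × Int) × Int),
      ds.foldl (fun sc d => match (pvTable data H L k).get? (y + d.1, x + d.2) with
        | some v => (PySem.Set.union sc.1 v.1, sc.2 + v.2) | none => sc) init
      = ((ds.filter (fun d => pvCondB data H L (pvDigit (9 - k)) (y + d.1, x + d.2))).map
          (fun d => (y + d.1, x + d.2))).foldl
          (fun sc n => (PySem.Set.union sc.1 (pvReach data H L k n),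
            sc.2 + ((pvEnds data H L k n).length : Int))) init := by
    intro ds
    induction ds with
    | nil => intro init; rfl
    | cons d ds ih =>
      intro init
      rw [List.foldl_cons, List.filter_cons]
      cases hc : pvCondB data H L (pvDigit (9 - k)) (y + d.1, x + d.2) with
      | true =>
        rw [pvTable_get?_some data H L k _ hc]
        simp only [if_true, List.map_cons, List.foldl_cons]
        exact ih _
      | false =>
        rw [pvTable_get?_none data H L k _ hc]
        simp only [if_false, Bool.false_eq_true]
        exact ih _
  show List.foldl _ (PySem.Set.empty, (0 : Int)) _ = _
  rw [hgen]
  have hnb : ((([(-1, 0), (0, 1), (1, 0), (0, -1)] : List (Int × Int)).filter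
        (fun d => pvCondB data H L (pvDigit (9 - k)) (y + d.1, x + d.2))).map
      (fun d => (y + d.1, x + d.2))) = pvNbrs data H L (pvDigit (9 - k)) (y, x) := rfl
  rw [hnb, PySem.List.foldl_prod_mk (f := fun s n => PySem.Set.union s (pvReach data H L k n))
    (g := fun a n => a + ((pvEnds data H L k n).length : Int))]
  rw [PySem.List.foldl_add]
  simp
-- ---- one pvProcess pass ----
lemma pvProcess_ne9 (data : List String) (H L : Int)
    (prev : PySem.Dict (Int × Int) (PySem.Set (Int × Int) × Int)) (h : Int) (ch : Char)
    (hH : H = (data.length : Int))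
    (hch : (PySem.Int.toStr h).toList = [ch]) (h9 : (h == (9 : Int)) = false) :
    pvProcess data H L prev h
      = PySem.Dict.mk ((pvCells data H L ch).map (fun c => (c, pvNbrFold prev c.1 c.2))) := by
  unfold pvProcess
  have hprod : ((PySem.List.pyRange 0 H 1) ×ˢ (PySem.List.pyRange 0 L 1))
      = (PySem.List.pyRange 0 H 1).flatMap (fun y => (PySem.List.pyRange 0 L 1).map (Prod.mk y)) := rfl
  have hstep1 :
      (PySem.List.pyRange 0 H 1).foldl (fun cur y =>
        (PySem.List.pyRange 0 L 1).foldl (fun cur x =>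
          if pvRowCharEq (PySem.List.pyGetD data y "") x (PySem.Int.toStr h) then
            if h == 9 then cur.insert (y, x) (PySem.Set.ofList [(y, x)], 1)
            else cur.insert (y, x) (pvNbrFold prev y x)
          else cur) cur) PySem.Dict.empty
      = (((PySem.List.pyRange 0 H 1) ×ˢ (PySem.List.pyRange 0 L 1)).foldl (fun cur p =>
          if pvRowCharEq (PySem.List.pyGetD data p.1 "") p.2 (PySem.Int.toStr h) then
            if h == 9 then cur.insert (p.1, p.2) (PySem.Set.ofList [(p.1, p.2)], 1)
            else cur.insert (p.1, p.2) (pvNbrFold prev p.1 p.2)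
          else cur) PySem.Dict.empty) := by
    rw [hprod, List.foldl_flatMap]
    refine PySem.List.foldl_congr_mem _ _ _ _ ?_
    intro acc y _
    rw [List.foldl_map]
  rw [hstep1]
  simp only [h9, Bool.false_eq_true, if_false]
  refine Eq.trans (PySem.List.foldl_if_eq_foldl_filter
    (fun p : Int × Int => pvRowCharEq (PySem.List.pyGetD data p.1 "") p.2 (PySem.Int.toStr h))
    (fun (cur : PySem.Dict (Int × Int) (PySem.Set (Int × Int) × Int)) (p : Int × Int) =>
      cur.insert (p.1, p.2) (pvNbrFold prev p.1 p.2)) _ _) ?_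
  have hfilter : (((PySem.List.pyRange 0 H 1) ×ˢ (PySem.List.pyRange 0 L 1)).filter
      (fun p : Int × Int => pvRowCharEq (PySem.List.pyGetD data p.1 "") p.2 (PySem.Int.toStr h)))
      = pvCells data H L ch := by
    unfold pvCells
    refine List.filter_congr ?_
    rintro ⟨y, x⟩ hp
    obtain ⟨hy, hx⟩ := List.mem_product.mp hp
    obtain ⟨hy0, hyH⟩ := PySem.List.mem_pyRange_one.mp hy
    obtain ⟨hx0, hxL⟩ := PySem.List.mem_pyRange_one.mp hx
    rw [pvRowCharEq_eq data y x _ ch hch hy0 (by rw [← hH]; exact hyH)]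
    simp [pvCondB, hy0, hx0, hyH, hxL]
  rw [hfilter]
  apply PySem.Dict.ext
  have hit := PySem.Dict.items_foldl_insert_fresh (pvCells data H L ch)
    (fun c : Int × Int => (c.1, c.2)) (fun c => pvNbrFold prev c.1 c.2) PySem.Dict.empty
    (fun a _ => PySem.Dict.contains_empty _) (by simpa using pvNodup_cells data H L ch)
  exact hit.trans (by simp [Prod.mk.eta, PySem.Dict.empty])

lemma pvProcess_9 (data : List String) (H L : Int)
    (prev : PySem.Dict (Int × Int) (PySem.Set (Int × Int) × Int))
    (hH : H = (data.length : Int)) :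
    pvProcess data H L prev 9 = pvTable data H L 0 := by
  unfold pvProcess pvTable
  have hprod : ((PySem.List.pyRange 0 H 1) ×ˢ (PySem.List.pyRange 0 L 1))
      = (PySem.List.pyRange 0 H 1).flatMap (fun y => (PySem.List.pyRange 0 L 1).map (Prod.mk y)) := rfl
  have hstep1 :
      (PySem.List.pyRange 0 H 1).foldl (fun cur y =>
        (PySem.List.pyRange 0 L 1).foldl (fun cur x =>
          if pvRowCharEq (PySem.List.pyGetD data y "") x (PySem.Int.toStr 9) then
            if (9 : Int) == 9 then cur.insert (y, x) (PySem.Set.ofList [(y, x)], 1)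
            else cur.insert (y, x) (pvNbrFold prev y x)
          else cur) cur) PySem.Dict.empty
      = (((PySem.List.pyRange 0 H 1) ×ˢ (PySem.List.pyRange 0 L 1)).foldl (fun cur p =>
          if pvRowCharEq (PySem.List.pyGetD data p.1 "") p.2 (PySem.Int.toStr 9) then
            if (9 : Int) == 9 then cur.insert (p.1, p.2) (PySem.Set.ofList [(p.1, p.2)], 1)
            else cur.insert (p.1, p.2) (pvNbrFold prev p.1 p.2)
          else cur) PySem.Dict.empty) := by
    rw [hprod, List.foldl_flatMap]
    refine PySem.List.foldl_congr_mem _ _ _ _ ?_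
    intro acc y _
    rw [List.foldl_map]
  rw [hstep1]
  simp only [show ((9 : Int) == 9) = true from rfl, if_true]
  refine Eq.trans (PySem.List.foldl_if_eq_foldl_filter
    (fun p : Int × Int => pvRowCharEq (PySem.List.pyGetD data p.1 "") p.2 (PySem.Int.toStr 9))
    (fun (cur : PySem.Dict (Int × Int) (PySem.Set (Int × Int) × Int)) (p : Int × Int) =>
      cur.insert (p.1, p.2) (PySem.Set.ofList [(p.1, p.2)], (1 : Int))) _ _) ?_
  have hfilter : (((PySem.List.pyRange 0 H 1) ×ˢ (PySem.List.pyRange 0 L 1)).filter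
      (fun p : Int × Int => pvRowCharEq (PySem.List.pyGetD data p.1 "") p.2 (PySem.Int.toStr 9)))
      = pvCells data H L (pvDigit 9) := by
    unfold pvCells
    refine List.filter_congr ?_
    rintro ⟨y, x⟩ hp
    obtain ⟨hy, hx⟩ := List.mem_product.mp hp
    obtain ⟨hy0, hyH⟩ := PySem.List.mem_pyRange_one.mp hy
    obtain ⟨hx0, hxL⟩ := PySem.List.mem_pyRange_one.mp hx
    rw [pvRowCharEq_eq data y x _ (pvDigit 9) (by decide) hy0 (by rw [← hH]; exact hyH)]
    simp [pvCondB, hy0, hx0, hyH, hxL]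
  rw [hfilter]
  apply PySem.Dict.ext
  have hit := PySem.Dict.items_foldl_insert_fresh (pvCells data H L (pvDigit 9))
    (fun c : Int × Int => (c.1, c.2)) (fun c => (PySem.Set.ofList [(c.1, c.2)], (1 : Int)))
    PySem.Dict.empty
    (fun a _ => PySem.Dict.contains_empty _) (by simpa using pvNodup_cells data H L (pvDigit 9))
  refine hit.trans ?_
  show _ = (pvCells data H L (pvDigit (9 - 0))).map _
  refine List.map_congr_left ?_
  intro c _
  have hof : PySem.Set.ofList [c] = [c] :=
    PySem.Set.ofList_eq_self_of_nodup _ (List.nodup_singleton c)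
  simp [Prod.mk.eta, pvReach, pvEnds, hof]

lemma pvTable_step (data : List String) (H L : Int) (k : Nat) (h : Int)
    (hH : H = (data.length : Int))
    (hh : h = ((8 - k : Nat) : Int)) (hk : k ≤ 8)
    (hch : (PySem.Int.toStr h).toList = [pvDigit (9 - (k + 1))]) :
    pvProcess data H L (pvTable data H L k) h = pvTable data H L (k + 1) := by
  have h9 : (h == (9 : Int)) = false := by
    have : h ≠ 9 := by omega
    simpa using this
  rw [pvProcess_ne9 data H L (pvTable data H L k) h (pvDigit (9 - (k + 1))) hH hch h9]
  have hmap : (pvCells data H L (pvDigit (9 - (k + 1)))).map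
      (fun c => (c, pvNbrFold (pvTable data H L k) c.1 c.2))
      = (pvCells data H L (pvDigit (9 - (k + 1)))).map
        (fun c => (c, (pvReach data H L (k + 1) c, ((pvEnds data H L (k + 1) c).length : Int)))) := by
    refine List.map_congr_left ?_
    intro c _
    rw [pvNbrFold_table data H L k c.1 c.2]
    refine congrArg (Prod.mk c) (Prod.ext ?_ ?_)
    · show List.foldl _ PySem.Set.empty (pvNbrs data H L (pvDigit (9 - k)) (c.1, c.2))
          = pvReach data H L (k + 1) c
      rw [Prod.mk.eta]
      rfl
    · show (List.map _ (pvNbrs data H L (pvDigit (9 - k)) (c.1, c.2))).sum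
          = ((pvEnds data H L (k + 1) c).length : Int)
      rw [Prod.mk.eta]
      rw [show pvEnds data H L (k + 1) c
          = (pvNbrs data H L (pvDigit (9 - k)) c).flatMap (pvEnds data H L k) from rfl]
      rw [List.length_flatMap, Nat.cast_list_sum, List.map_map]
      rfl
  rw [hmap]
  rfl

-- ---- starting spots (needs the rectangular precondition) ----
lemma pvFilterRange_eq (n m : Int) (P Q : Int → Bool) (h0m : 0 ≤ m) (hmn : m ≤ n)
    (h : ∀ x : Int, 0 ≤ x → (x < n ∧ P x = true ↔ x < m ∧ Q x = true)) :
    (PySem.List.pyRange 0 n 1).filter P = (PySem.List.pyRange 0 m 1).filter Q := by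
  rw [PySem.List.pyRange_one_append 0 m n h0m hmn, List.filter_append]
  have h2 : (PySem.List.pyRange m n 1).filter P = [] := by
    rw [List.filter_eq_nil_iff]
    intro a ha
    obtain ⟨hma, han⟩ := PySem.List.mem_pyRange_one.mp ha
    intro hp
    have := ((h a (le_trans h0m hma)).mp ⟨han, hp⟩).1
    omega
  rw [h2, List.append_nil]
  refine List.filter_congr ?_
  intro a ha
  obtain ⟨ha0, ham⟩ := PySem.List.mem_pyRange_one.mp ha
  cases hp : P a with
  | true => exact (((h a ha0).mp ⟨lt_of_lt_of_le ham hmn, hp⟩).2).symm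
  | false =>
    cases hq : Q a with
    | true =>
      have := ((h a ha0).mpr ⟨ham, hq⟩).2
      rw [hp] at this
      cases this
    | false => rfl

lemma pvStarts_eq (data : List String) (H L : Int) (Lnat : Nat)
    (hH : H = (data.length : Int)) (hL : L = (Lnat : Int))
    (hge : ∀ row ∈ data, Lnat ≤ row.toList.length)
    (h0 : ∀ row ∈ data, '0' ∉ row.toList.drop Lnat) :
    ((PySem.List.enumerate data 0).foldl (fun acc p =>
      (PySem.List.enumerate p.2.toList 0).foldl (fun acc2 q =>
        if q.2 == '0' then acc2 ++ [(p.1, q.1)] else acc2) acc) [])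
    = pvCells data H L (pvDigit 0) := by
  subst hH hL
  rw [PySem.List.foldl_congr_mem _ _ (fun acc (p : Int × String) =>
      acc ++ ((PySem.List.enumerate p.2.toList 0).filter (fun q => q.2 == '0')).map
        (fun q => (p.1, q.1))) _
    (fun acc p _ => PySem.List.foldl_append_if (fun q : Int × Char => q.2 == '0')
      (fun q : Int × Char => (p.1, q.1)) _ acc)]
  rw [PySem.List.foldl_append_eq_flatMap, List.nil_append]
  rw [PySem.List.enumerate_eq_map_pyRange data "", List.flatMap_map]
  unfold pvCells
  rw [show ((PySem.List.pyRange 0 ((data.length : Int)) 1) ×ˢ (PySem.List.pyRange 0 ((Lnat : Int)) 1))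
      = (PySem.List.pyRange 0 ((data.length : Int)) 1).flatMap
          (fun y => (PySem.List.pyRange 0 ((Lnat : Int)) 1).map (Prod.mk y)) from rfl]
  rw [List.filter_flatMap, PySem.List.len_eq]
  refine List.flatMap_congr ?_
  intro y hy
  obtain ⟨hy0, hyH⟩ := PySem.List.mem_pyRange_one.mp hy
  obtain ⟨n, rfl⟩ : ∃ m : Nat, y = (m : Int) := ⟨y.toNat, (Int.toNat_of_nonneg hy0).symm⟩
  have hn : n < data.length := by exact_mod_cast hyH
  have hrow : PySem.List.pyGetD data (n : Int) "" = data[n] := by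
    rw [PySem.List.pyGetD_natCast, List.getD_eq_getElem data "" hn]
  rw [hrow]
  have hmem : data[n] ∈ data := List.getElem_mem hn
  have hge' : Lnat ≤ data[n].toList.length := hge _ hmem
  have h0' : '0' ∉ data[n].toList.drop Lnat := h0 _ hmem
  have hatx : ∀ m : Nat, pvAt data ((n : Int), (m : Int)) = data[n].toList[m]? := by
    intro m
    have hA : pvAt data ((n : Int), (m : Int))
        = (match PySem.List.pyGet? data (n : Int) with
           | some row => PySem.Str.pyGet? row (m : Int)
           | none => none) := rfl
    rw [hA, PySem.List.pyGet?_natCast, List.getElem?_eq_getElem hn]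
    show PySem.Str.pyGet? data[n] (m : Int) = _
    rw [show PySem.Str.pyGet? data[n] (m : Int) = PySem.List.pyGet? data[n].toList (m : Int)
        from by simp, PySem.List.pyGet?_natCast]
  rw [PySem.List.enumerate_eq_map_pyRange data[n].toList ' ', List.filter_map, List.map_map,
      PySem.List.len_eq, List.filter_map]
  refine congrArg₂ _ ?_ ?_
  · funext j
    simp
  · refine pvFilterRange_eq _ _ _ _ (by positivity) (by exact_mod_cast hge') ?_
    intro x hx0
    simp only [Function.comp_def]
    constructor
    · rintro ⟨hxn, hP⟩
      obtain ⟨m, rfl⟩ : ∃ m' : Nat, x = (m' : Int) := ⟨x.toNat, (Int.toNat_of_nonneg hx0).symm⟩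
      have hm : m < data[n].toList.length := by exact_mod_cast hxn
      have hchar : data[n].toList[m] = '0' := by
        have := hP
        rw [PySem.List.pyGetD_natCast, List.getD_eq_getElem _ ' ' hm] at this
        simpa using this
      have hmL : m < Lnat := by
        by_contra hc
        obtain ⟨j, rfl⟩ : ∃ j, m = Lnat + j := ⟨m - Lnat, by omega⟩
        refine h0' ?_
        have hj : j < (data[n].toList.drop Lnat).length := by
          rw [List.length_drop]; omega
        have hged : (data[n].toList.drop Lnat)[j]'hj
            = data[n].toList[Lnat + j]'(by rw [List.length_drop] at hj; omega) :=
          List.getElem_drop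
        rw [← hchar, ← hged]
        exact List.getElem_mem hj
      refine ⟨by exact_mod_cast hmL, ?_⟩
      unfold pvCondB
      rw [hatx m, List.getElem?_eq_getElem hm, hchar]
      simp only [Bool.and_eq_true, decide_eq_true_eq]
      exact ⟨⟨⟨⟨hy0, hyH⟩, hx0⟩, by exact_mod_cast hmL⟩, by decide⟩
    · rintro ⟨hxL, hQ⟩
      obtain ⟨m, rfl⟩ : ∃ m' : Nat, x = (m' : Int) := ⟨x.toNat, (Int.toNat_of_nonneg hx0).symm⟩
      unfold pvCondB at hQ
      rw [hatx m] at hQ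
      simp only [Bool.and_eq_true, decide_eq_true_eq, beq_iff_eq] at hQ
      have hsome : data[n].toList[m]? = some (pvDigit 0) := hQ.2
      rw [List.getElem?_eq_some_iff] at hsome
      obtain ⟨hm, hchar⟩ := hsome
      refine ⟨by exact_mod_cast hm, ?_⟩
      rw [PySem.List.pyGetD_natCast, List.getD_eq_getElem _ ' ' hm, hchar]
      decide

-- ---- final assembly ----
theorem pvMain (data : List String) (hne : data ≠ [])
    (hrows : ∀ row ∈ data,
      (data.headD "").toList.length ≤ row.toList.length ∧
      '0' ∉ row.toList.drop (data.headD "").toList.length) :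
    walk_trails data = walk_trails_alt data := by
  have hH : PySem.List.len data = (data.length : Int) := PySem.List.len_eq data
  have hL : PySem.Str.len (PySem.List.pyGetD data 0 "") = ((data.headD "").toList.length : Int) := by
    rw [PySem.List.pyGetD_zero, PySem.Str.len_eq]
    congr 2
    cases data with
    | nil => cases hne rfl
    | cons a l => rfl
  simp only [walk_trails, walk_trails_alt]
  rw [pvStarts_eq data (PySem.List.len data) (PySem.Str.len (PySem.List.pyGetD data 0 ""))
    (data.headD "").toList.length hH hL (fun row h => (hrows row h).1) (fun row h => (hrows row h).2)]
  have hw : ∀ pos : Int × Int,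
      pvWhileA data (PySem.List.len data) (PySem.Str.len (PySem.List.pyGetD data 0 "")) 9 1
        ([] ++ [pos])
      = pvEnds data (PySem.List.len data) (PySem.Str.len (PySem.List.pyGetD data 0 "")) 9 pos := by
    intro pos
    rw [List.nil_append, pvWhileA_eq, pvChain_flat, List.flatMap_singleton]
  simp only [hw]
  -- B: run the ten passes
  have hrange : PySem.List.pyRange 9 (-1) (-1) = [9, 8, 7, 6, 5, 4, 3, 2, 1, 0] := by decide
  rw [hrange]
  simp only [List.foldl_cons, List.foldl_nil]
  rw [pvProcess_9 data _ _ PySem.Dict.empty hH,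
    pvTable_step data _ _ 0 8 hH (by norm_num) (by norm_num) (by decide),
    pvTable_step data _ _ 1 7 hH (by norm_num) (by norm_num) (by decide),
    pvTable_step data _ _ 2 6 hH (by norm_num) (by norm_num) (by decide),
    pvTable_step data _ _ 3 5 hH (by norm_num) (by norm_num) (by decide),
    pvTable_step data _ _ 4 4 hH (by norm_num) (by norm_num) (by decide),
    pvTable_step data _ _ 5 3 hH (by norm_num) (by norm_num) (by decide),
    pvTable_step data _ _ 6 2 hH (by norm_num) (by norm_num) (by decide),
    pvTable_step data _ _ 7 1 hH (by norm_num) (by norm_num) (by decide),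
    pvTable_step data _ _ 8 0 hH (by norm_num) (by norm_num) (by decide)]
  have hitems : (pvTable data (PySem.List.len data)
        (PySem.Str.len (PySem.List.pyGetD data 0 "")) 9).items
      = (pvCells data (PySem.List.len data) (PySem.Str.len (PySem.List.pyGetD data 0 ""))
          (pvDigit 0)).map
        (fun c => (c, (pvReach data (PySem.List.len data)
            (PySem.Str.len (PySem.List.pyGetD data 0 "")) 9 c,
          ((pvEnds data (PySem.List.len data)
            (PySem.Str.len (PySem.List.pyGetD data 0 "")) 9 c).length : Int)))) := rfl
  rw [hitems]
  -- split the two pair-folds into independent sums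
  have hsplitA := PySem.List.foldl_prod_mk
    (f := fun (a : Int) (e : List (Int × Int)) => a + PySem.List.len (PySem.Set.ofList e))
    (g := fun (a : Int) (e : List (Int × Int)) => a + PySem.List.len e)
    ((pvCells data (PySem.List.len data) (PySem.Str.len (PySem.List.pyGetD data 0 ""))
        (pvDigit 0)).map
      (pvEnds data (PySem.List.len data) (PySem.Str.len (PySem.List.pyGetD data 0 "")) 9))
    0 0
  have hsplitB := PySem.List.foldl_prod_mk
    (f := fun (a : Int) (it : (Int × Int) × (PySem.Set (Int × Int) × Int)) =>
      a + PySem.List.len it.2.1)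
    (g := fun (a : Int) (it : (Int × Int) × (PySem.Set (Int × Int) × Int)) => a + it.2.2)
    ((pvCells data (PySem.List.len data) (PySem.Str.len (PySem.List.pyGetD data 0 ""))
        (pvDigit 0)).map
      (fun c => (c, (pvReach data (PySem.List.len data)
          (PySem.Str.len (PySem.List.pyGetD data 0 "")) 9 c,
        ((pvEnds data (PySem.List.len data)
          (PySem.Str.len (PySem.List.pyGetD data 0 "")) 9 c).length : Int)))))
    0 0
  rw [hsplitA, hsplitB, PySem.List.foldl_add, PySem.List.foldl_add, PySem.List.foldl_add,
    PySem.List.foldl_add, List.map_map, List.map_map]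
  refine congrArg₂ _ (congrArg₂ _ rfl ?_) (congrArg₂ _ (congrArg₂ _ rfl ?_) rfl)
  · simp only [List.map_map, Function.comp_def, zero_add, PySem.List.len_eq, pvReach_len]
  · simp only [List.map_map, Function.comp_def, zero_add, PySem.List.len_eq]

-- ===== VERDICT (by name: the statement is the Claim_ definition above) =====
theorem walk_trails_spec : Claim_equal_walk_trails := by
  intro data _ hpre
  unfold Spec_walk_trails
  exact pvMain data hpre.1 hpre.2
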